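-- pv_equiv track=rewrite | github.com/msft-mirror-aosp/platform.cts | apps/CameraITS/tests/scene7/test_multi_camera_switch.py | _get_error_msg
-- ===== SOURCE A (Python) =====
-- def _get_error_msg(failed_awb_msg, failed_ae_msg, failed_af_msg):
--   """"Returns the error message string.
--
--   Args:
--     failed_awb_msg: list of awb error msgs
--     failed_ae_msg: list of ae error msgs
--     failed_af_msg: list of af error msgs
--   Returns:
--     error_msg: str; error_msg string
--   """
--   error_msg = ''
--   if failed_awb_msg:
--     error_msg = f'{error_msg}----AWB Check----\n'
--     for msg in failed_awb_msg:
--       error_msg = f'{error_msg}{msg}\n'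
--   if failed_ae_msg:
--     error_msg = f'{error_msg}----AE Check----\n'
--     for msg in failed_ae_msg:
--       error_msg = f'{error_msg}{msg}\n'
--   if failed_af_msg:
--     error_msg = f'{error_msg}----AF Check----\n'
--     for msg in failed_af_msg:
--       error_msg = f'{error_msg}{msg}\n'
--   return error_msg
-- ===== SOURCE B (Python) =====
-- def _get_error_msg(failed_awb_msg, failed_ae_msg, failed_af_msg):
--   """Returns the error message string (recursive, built back-to-front)."""
--   def build(sections):
--     if not sections:
--       return ''
--     (header, msgs), rest = sections[0], build(sections[1:])
--     if not msgs:
--       return rest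
--     return header + '\n' + '\n'.join(msgs) + '\n' + rest
--   return build([('----AWB Check----', failed_awb_msg),
--                 ('----AE Check----', failed_ae_msg),
--                 ('----AF Check----', failed_af_msg)])
-- ===== Notes on version B (the rewrite author's own statement) =====
-- stated objective: faster
-- what changed: Replaces three unrolled if/for blocks that grow one string line by line by repeated concatenation with a recursive function over a (header, messages) table that builds the result back-to-front, rendering each section in one step as header + '\n'.join(msgs) + trailing newline.
import Mathlib
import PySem

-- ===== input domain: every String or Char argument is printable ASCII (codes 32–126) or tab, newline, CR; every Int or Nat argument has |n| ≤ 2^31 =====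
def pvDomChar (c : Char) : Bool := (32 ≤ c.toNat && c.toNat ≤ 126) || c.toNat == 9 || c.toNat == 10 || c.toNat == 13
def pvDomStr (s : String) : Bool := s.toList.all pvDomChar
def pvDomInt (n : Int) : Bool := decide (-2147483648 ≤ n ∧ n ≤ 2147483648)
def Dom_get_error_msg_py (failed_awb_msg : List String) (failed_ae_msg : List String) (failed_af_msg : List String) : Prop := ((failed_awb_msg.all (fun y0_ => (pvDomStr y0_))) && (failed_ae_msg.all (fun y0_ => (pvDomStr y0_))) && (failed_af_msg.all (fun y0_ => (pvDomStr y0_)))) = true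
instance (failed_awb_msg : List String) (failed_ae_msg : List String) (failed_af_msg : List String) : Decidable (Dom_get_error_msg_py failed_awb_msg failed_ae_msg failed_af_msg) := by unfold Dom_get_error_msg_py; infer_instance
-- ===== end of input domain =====

-- B replaces A's three unrolled if/for blocks (one string grown line by line) with a
-- recursive pass over a (header, messages) table built back-to-front, each non-empty
-- section rendered in one step as header + '\n'.join(msgs) + '\n': alternative decomposition.

-- ===== PORT A =====
-- literal transliteration: sequential string accumulator, one if/for block per check
def get_error_msg_py (failed_awb_msg : List String) (failed_ae_msg : List String) (failed_af_msg : List String) : String :=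
  let error_msg := ""
  let error_msg := if failed_awb_msg.isEmpty then error_msg else
    failed_awb_msg.foldl (fun s msg => s ++ msg ++ "\n") (error_msg ++ "----AWB Check----\n")
  let error_msg := if failed_ae_msg.isEmpty then error_msg else
    failed_ae_msg.foldl (fun s msg => s ++ msg ++ "\n") (error_msg ++ "----AE Check----\n")
  let error_msg := if failed_af_msg.isEmpty then error_msg else
    failed_af_msg.foldl (fun s msg => s ++ msg ++ "\n") (error_msg ++ "----AF Check----\n")
  error_msg

-- ===== PORT B =====
-- Source B's recursive build over the section table, back-to-front; '\n'.join -> PySem.Str.join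
def pvBuildSections : List (String × List String) → String
  | [] => ""
  | (header, msgs) :: sections =>
    let rest := pvBuildSections sections
    if msgs.isEmpty then rest
    else header ++ "\n" ++ PySem.Str.join "\n" msgs ++ "\n" ++ rest

def get_error_msg_py_alt (failed_awb_msg : List String) (failed_ae_msg : List String) (failed_af_msg : List String) : String :=
  pvBuildSections [("----AWB Check----", failed_awb_msg),
                   ("----AE Check----", failed_ae_msg),
                   ("----AF Check----", failed_af_msg)]

-- ===== PRECONDITION & SPEC =====
def Spec_get_error_msg_py (failed_awb_msg : List String) (failed_ae_msg : List String) (failed_af_msg : List String) (out : String) : Prop := out = get_error_msg_py_alt failed_awb_msg failed_ae_msg failed_af_msg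
instance (failed_awb_msg : List String) (failed_ae_msg : List String) (failed_af_msg : List String) (out : String) : Decidable (Spec_get_error_msg_py failed_awb_msg failed_ae_msg failed_af_msg out) := by unfold Spec_get_error_msg_py; infer_instance

-- ===== CLAIM (what is proved, stated in full; the proofs are below) =====
def Claim_equal_get_error_msg_py : Prop := ∀ (failed_awb_msg : List String) (failed_ae_msg : List String) (failed_af_msg : List String), Dom_get_error_msg_py failed_awb_msg failed_ae_msg failed_af_msg → Spec_get_error_msg_py failed_awb_msg failed_ae_msg failed_af_msg (get_error_msg_py failed_awb_msg failed_ae_msg failed_af_msg)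

-- ===== LEMMAS AND PROOFS =====

-- ===== VERDICT (by name: the statement is the Claim_ definition above) =====
-- '\n'.join on a one-element / a two-or-more-element list, at String level
theorem pv_join_singleton (m : String) : PySem.Str.join "\n" [m] = m := by
  show String.ofList _ = _
  rw [List.map_cons, List.map_nil, PySem.Chars.join_singleton, String.ofList_toList]

theorem pv_join_cons_cons (m m2 : String) (r : List String) :
    PySem.Str.join "\n" (m :: m2 :: r) = m ++ "\n" ++ PySem.Str.join "\n" (m2 :: r) := by
  show String.ofList _ = _
  rw [List.map_cons, List.map_cons, PySem.Chars.join_cons_cons,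
    String.ofList_append, String.ofList_append, String.ofList_toList, String.ofList_toList]
  rfl

-- A's per-line foldl over one non-empty section equals init ++ '\n'.join(msgs) ++ '\n'
theorem pv_foldl_eq_join (msgs : List String) (init : String) (h : msgs ≠ []) :
    msgs.foldl (fun s msg => s ++ (msg ++ "\n")) init
      = init ++ (PySem.Str.join "\n" msgs ++ "\n") := by
  induction msgs generalizing init with
  | nil => exact absurd rfl h
  | cons m rest ih =>
    cases rest with
    | nil => simp [pv_join_singleton]
    | cons m2 rest2 =>
      rw [List.foldl_cons, ih _ (by simp), pv_join_cons_cons]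
      simp [String.append_assoc]

theorem get_error_msg_py_spec : Claim_equal_get_error_msg_py := by
  intro awb ae af _
  show _ = _
  unfold get_error_msg_py get_error_msg_py_alt
  by_cases h1 : awb.isEmpty <;> by_cases h2 : ae.isEmpty <;> by_cases h3 : af.isEmpty <;>
    simp_all [pvBuildSections, List.isEmpty_iff, pv_foldl_eq_join, String.append_assoc] <;>
    (simp only [← String.append_assoc]; simp) <;> simp [String.append_assoc]
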